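-- pv_equiv track=rewrite | github.com/schererant/uq-qnn | src/circuits.py | get_mzi_modes_for_phase
-- ===== SOURCE A (Python) =====
-- from typing import Optional, Tuple, List
--
-- def get_mzi_modes_for_phase(phase_idx: int, n_modes: int) -> Tuple[int, int]:
--     """
--     Maps a phase index to the mode pair (m1, m2) of the MZI that contains it.
--     Uses the same layer ordering as clements_circuit.
--
--     Args:
--         phase_idx (int): Index into the phases array (0 to n_modes*(n_modes-1)-1).
--         n_modes (int): Number of modes in the circuit.
--
--     Returns:
--         Tuple[int, int]: (mode_low, mode_high) for the MZI containing this phase.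
--     """
--     if n_modes < 2:
--         raise ValueError(f"Requires at least 2 modes, got {n_modes}")
--     expected_phases = n_modes * (n_modes - 1)
--     if phase_idx < 0 or phase_idx >= expected_phases:
--         raise ValueError(
--             f"phase_idx must be in [0, {expected_phases-1}] for {n_modes} modes, got {phase_idx}"
--         )
--     idx = 0
--     for layer in range(n_modes - 1):
--         is_even_layer = (layer % 2 == 0)
--         start_mode = 0 if is_even_layer else 1
--         for m in range(start_mode, n_modes - 1, 2):
--             if m + 1 < n_modes:
--                 if phase_idx in (idx, idx + 1):
--                     return (m, m + 1)
--                 idx += 2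
--     return (0, 1)  # Fallback (should not reach)
-- ===== SOURCE B (Python) =====
-- def get_mzi_modes_for_phase(phase_idx: int, n_modes: int):
--     """Closed-form O(1) version: derive the layer and MZI position arithmetically."""
--     if n_modes < 2:
--         raise ValueError(f"Requires at least 2 modes, got {n_modes}")
--     expected_phases = n_modes * (n_modes - 1)
--     if phase_idx < 0 or phase_idx >= expected_phases:
--         raise ValueError(
--             f"phase_idx must be in [0, {expected_phases-1}] for {n_modes} modes, got {phase_idx}"
--         )
--     k = phase_idx // 2                    # global MZI index
--     e = n_modes // 2                      # MZIs in an even layer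
--     pair, rem = divmod(k, n_modes - 1)    # each even+odd layer pair holds n_modes-1 MZIs
--     if rem < e:
--         layer, m = 2 * pair, 2 * rem
--     else:
--         layer, m = 2 * pair + 1, 2 * (rem - e) + 1
--     if layer > n_modes - 2:
--         return (0, 1)  # phase index beyond the MZIs actually placed
--     return (m, m + 1)
-- ===== Notes on version B (the rewrite author's own statement) =====
-- stated objective: faster
-- what changed: Replaced the nested scan over all layers and MZIs (advancing a running phase counter until it hits phase_idx) by a closed-form computation: the global MZI index phase_idx//2 is split by divmod into a layer-pair index and an offset, from which layer parity and mode are derived arithmetically in O(1).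
import Mathlib
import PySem

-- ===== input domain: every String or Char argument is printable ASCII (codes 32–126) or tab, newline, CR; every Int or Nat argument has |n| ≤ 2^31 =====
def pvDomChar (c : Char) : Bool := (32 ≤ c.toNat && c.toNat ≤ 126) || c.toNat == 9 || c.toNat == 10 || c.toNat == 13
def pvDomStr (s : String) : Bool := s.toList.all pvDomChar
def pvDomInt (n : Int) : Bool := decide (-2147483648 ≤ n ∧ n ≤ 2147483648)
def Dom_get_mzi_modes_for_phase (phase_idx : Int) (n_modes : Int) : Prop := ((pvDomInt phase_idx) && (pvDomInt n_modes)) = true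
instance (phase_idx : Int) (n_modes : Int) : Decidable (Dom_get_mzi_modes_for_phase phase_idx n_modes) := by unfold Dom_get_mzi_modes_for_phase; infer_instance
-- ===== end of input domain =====

-- B replaces A's nested layer/MZI scan by a closed-form divmod computation of the layer and mode (O(1) vs O(n^2)); A = B is proved on all inputs where the Python A returns (Pre_).

-- ===== PORT A =====
-- inner loop 'for m in range(start_mode, n_modes-1, 2)': recursion on m (early return as Option, running phase counter idx)
def innerA (p n : Int) (m idx : Int) : Option (Int × Int) × Int :=
  if m < n - 1 then
    if m + 1 < n then
      if p = idx ∨ p = idx + 1 then (some (m, m + 1), idx)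
      else innerA p n (m + 2) (idx + 2)
    else innerA p n (m + 2) idx
  else (none, idx)
termination_by (n - 1 - m).toNat
decreasing_by all_goals omega

-- outer loop 'for layer in range(n_modes-1)': recursion on layer
def outerA (p n : Int) (layer idx : Int) : Option (Int × Int) :=
  if layer < n - 1 then
    match innerA p n (if PySem.Int.mod layer 2 = 0 then 0 else 1) idx with
    | (some r, _) => some r
    | (none, idx') => outerA p n (layer + 1) idx'
  else none
termination_by (n - 1 - layer).toNat
decreasing_by omega

def get_mzi_modes_for_phase (phase_idx : Int) (n_modes : Int) : List Int :=
  match outerA phase_idx n_modes 0 0 with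
  | some r => [r.1, r.2]
  | none => [0, 1]   -- fallback (reachable for large in-range phase_idx; A returns it)

-- ===== PORT B =====
def get_mzi_modes_for_phase_alt (phase_idx : Int) (n_modes : Int) : List Int :=
  let k := PySem.Int.floordiv phase_idx 2
  let e := PySem.Int.floordiv n_modes 2
  let pair := PySem.Int.floordiv k (n_modes - 1)
  let rem := PySem.Int.mod k (n_modes - 1)
  let lm : Int × Int := if rem < e then (2 * pair, 2 * rem) else (2 * pair + 1, 2 * (rem - e) + 1)
  if lm.1 > n_modes - 2 then [0, 1] else [lm.2, lm.2 + 1]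

-- ===== PRECONDITION & SPEC =====
-- Pre_ excludes exactly the inputs on which the Python A raises ValueError: n_modes < 2, or phase_idx outside [0, n_modes*(n_modes-1)).
def Pre_get_mzi_modes_for_phase (phase_idx : Int) (n_modes : Int) : Prop :=
  2 ≤ n_modes ∧ 0 ≤ phase_idx ∧ phase_idx < n_modes * (n_modes - 1)
instance (phase_idx : Int) (n_modes : Int) : Decidable (Pre_get_mzi_modes_for_phase phase_idx n_modes) := by unfold Pre_get_mzi_modes_for_phase; infer_instance

def pvWitness_get_mzi_modes_for_phase : Int × Int := (3, 4)

def Spec_get_mzi_modes_for_phase (phase_idx : Int) (n_modes : Int) (out : List Int) : Prop := out = get_mzi_modes_for_phase_alt phase_idx n_modes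
instance (phase_idx : Int) (n_modes : Int) (out : List Int) : Decidable (Spec_get_mzi_modes_for_phase phase_idx n_modes out) := by unfold Spec_get_mzi_modes_for_phase; infer_instance

-- ===== CLAIM (what is proved, stated in full; the proofs are below) =====
def Claim_equal_get_mzi_modes_for_phase : Prop := ∀ (phase_idx : Int) (n_modes : Int), Dom_get_mzi_modes_for_phase phase_idx n_modes → Pre_get_mzi_modes_for_phase phase_idx n_modes → Spec_get_mzi_modes_for_phase phase_idx n_modes (get_mzi_modes_for_phase phase_idx n_modes)

-- ===== LEMMAS AND PROOFS =====

-- closed form of A's search once the layers below l are consumed (proof-side helper)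
def Bopt (q n l : Int) : Option (Int × Int) :=
  if q / 2 % (n - 1) < n / 2 then
    (if l + 2 * (q / 2 / (n - 1)) > n - 2 then none else some (2 * (q / 2 % (n - 1)), 2 * (q / 2 % (n - 1)) + 1))
  else
    (if l + 2 * (q / 2 / (n - 1)) + 1 > n - 2 then none
     else some (2 * (q / 2 % (n - 1) - n / 2) + 1, 2 * (q / 2 % (n - 1) - n / 2) + 1 + 1))

lemma innerA_none (p n : Int) : ∀ (c : Nat) (start idx : Int),
    n - 1 ≤ start + 2 * (c : Int) → start + 2 * (c : Int) ≤ n →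
    (p < idx ∨ idx + 2 * (c : Int) ≤ p) →
    innerA p n start idx = (none, idx + 2 * (c : Int)) := by
  intro c
  induction c with
  | zero =>
    intro start idx hc1 hc2 h
    rw [innerA, if_neg (by push_cast at hc1; omega)]
    norm_num
  | succ c ih =>
    intro start idx hc1 hc2 h
    push_cast at hc1 hc2 h ⊢
    rw [innerA, if_pos (by omega), if_pos (by omega), if_neg (by omega)]
    rw [ih (start + 2) (idx + 2) (by omega) (by omega) (by omega)]
    refine congrArg₂ Prod.mk rfl (by ring)

lemma innerA_some (p n : Int) : ∀ (c : Nat) (start idx : Int),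
    n - 1 ≤ start + 2 * (c : Int) → start + 2 * (c : Int) ≤ n →
    idx ≤ p → p < idx + 2 * (c : Int) →
    innerA p n start idx
      = (some (start + 2 * ((p - idx) / 2), start + 2 * ((p - idx) / 2) + 1), idx + 2 * ((p - idx) / 2)) := by
  intro c
  induction c with
  | zero => intro start idx hc1 hc2 h1 h2; push_cast at h2; omega
  | succ c ih =>
    intro start idx hc1 hc2 h1 h2
    push_cast at hc1 hc2 h2
    rw [innerA, if_pos (by omega), if_pos (by omega)]
    by_cases hfound : p = idx ∨ p = idx + 1
    · rw [if_pos hfound]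
      have hj : (p - idx) / 2 = 0 := by omega
      rw [hj]; norm_num
    · rw [if_neg hfound]
      rw [ih (start + 2) (idx + 2) (by omega) (by omega) (by omega)
          (by omega)]
      have hj : (p - (idx + 2)) / 2 = (p - idx) / 2 - 1 := by omega
      rw [hj]
      refine congrArg₂ Prod.mk (congrArg some ?_) (by ring)
      refine congrArg₂ Prod.mk (by ring) (by ring)

lemma Bopt_none_of_ge (q n l : Int) (hn : 2 ≤ n) (hq : 0 ≤ q) (hl : n - 1 ≤ l) :
    Bopt q n l = none := by
  have hk : 0 ≤ q / 2 := Int.ediv_nonneg hq (by norm_num)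
  have hpair : 0 ≤ q / 2 / (n - 1) := Int.ediv_nonneg hk (by omega)
  unfold Bopt
  split_ifs with h1 h2 h2 <;> first | rfl | omega

lemma Bopt_shift (q n l : Int) (hn : 2 ≤ n) :
    Bopt (q - 2 * (n - 1)) n (l + 2) = Bopt q n l := by
  have hk : (q - 2 * (n - 1)) / 2 = q / 2 - (n - 1) := by omega
  have hne : n - 1 ≠ 0 := by omega
  have hpair : (q / 2 - (n - 1)) / (n - 1) = q / 2 / (n - 1) - 1 := by
    have := Int.add_mul_ediv_right (q / 2) (-1) hne
    simpa [sub_eq_add_neg, neg_mul] using this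
  have hrem : (q / 2 - (n - 1)) % (n - 1) = q / 2 % (n - 1) := by
    rw [show q / 2 - (n - 1) = q / 2 + (n - 1) * (-1) by ring, Int.add_mul_emod_self_left]
  unfold Bopt
  rw [hk, hpair, hrem]
  have hlay : l + 2 + 2 * (q / 2 / (n - 1) - 1) = l + 2 * (q / 2 / (n - 1)) := by ring
  rw [hlay]

lemma outer_spec (p n : Int) (hn : 2 ≤ n) : ∀ (d : Nat) (l idx : Int),
    0 ≤ l → l % 2 = 0 → idx ≤ p → n - 1 - l ≤ (d : Int) →
    outerA p n l idx = Bopt (p - idx) n l := by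
  intro d
  induction d with
  | zero =>
    intro l idx hl hev hip hd
    push_cast at hd
    rw [outerA, if_neg (by omega)]
    rw [Bopt_none_of_ge _ _ _ hn (by omega) (by omega)]
  | succ d ih =>
    intro l idx hl hev hip hd
    push_cast at hd
    by_cases hend : n - 1 ≤ l
    · rw [outerA, if_neg (by omega)]
      rw [Bopt_none_of_ge _ _ _ hn (by omega) hend]
    · rw [outerA, if_pos (by omega)]
      have hmod : PySem.Int.mod l 2 = 0 := by
        rw [PySem.Int.mod_eq_emod_of_pos (by norm_num)]; exact hev
      rw [if_pos hmod]
      have hce : (((n / 2).toNat : Int)) = n / 2 := by omega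
      by_cases h1 : p < idx + 2 * (n / 2)
      · -- found in the even layer
        rw [innerA_some p n (n / 2).toNat 0 idx (by omega) (by omega) hip (by omega)]
        have hk0 : 0 ≤ (p - idx) / 2 := Int.ediv_nonneg (by omega) (by norm_num)
        have hklt : (p - idx) / 2 < n - 1 := by omega
        have hpair : (p - idx) / 2 / (n - 1) = 0 := Int.ediv_eq_zero_of_lt hk0 (by omega)
        have hrem : (p - idx) / 2 % (n - 1) = (p - idx) / 2 := Int.emod_eq_of_lt hk0 (by omega)
        unfold Bopt
        rw [hpair, hrem, if_pos (by omega : (p - idx) / 2 < n / 2)]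
        rw [if_neg (by omega : ¬ (l + 2 * 0 > n - 2))]
        simp
      · -- even layer exhausted
        rw [innerA_none p n (n / 2).toNat 0 idx (by omega) (by omega) (by omega)]
        have hidx' : idx + 2 * (((n / 2).toNat : Int)) = idx + 2 * (n / 2) := by omega
        rw [hidx']
        show outerA p n (l + 1) (idx + 2 * (n / 2)) = Bopt (p - idx) n l
        by_cases hend2 : n - 1 ≤ l + 1
        · -- l = n - 2 : no odd layer left
          rw [outerA, if_neg (by omega)]
          have hke : n / 2 ≤ (p - idx) / 2 := by omega
          have hrem0 : 0 ≤ (p - idx) / 2 % (n - 1) := Int.emod_nonneg _ (by omega)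
          have hremlt : (p - idx) / 2 % (n - 1) < n - 1 := Int.emod_lt_of_pos _ (by omega)
          have hpair0 : 0 ≤ (p - idx) / 2 / (n - 1) := Int.ediv_nonneg (by omega) (by omega)
          have hdecomp : (n - 1) * ((p - idx) / 2 / (n - 1)) + (p - idx) / 2 % (n - 1) = (p - idx) / 2 :=
            Int.mul_ediv_add_emod _ _
          show (none : Option (Int × Int)) = Bopt (p - idx) n l
          unfold Bopt
          split_ifs with hr h2 h2
          · rfl
          · exfalso
            have hp1 : (p - idx) / 2 / (n - 1) ≠ 0 := by
              intro h0; rw [h0] at hdecomp; simp at hdecomp; omega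
            omega
          · rfl
          · exfalso; omega
        · -- odd layer present
          rw [outerA, if_pos (by omega)]
          have hmod1 : ¬ PySem.Int.mod (l + 1) 2 = 0 := by
            rw [PySem.Int.mod_eq_emod_of_pos (by norm_num)]; omega
          rw [if_neg hmod1]
          have hco : ((((n - 1) / 2).toNat : Int)) = (n - 1) / 2 := by omega
          by_cases h2 : p < idx + 2 * (n / 2) + 2 * ((n - 1) / 2)
          · -- found in the odd layer
            rw [innerA_some p n ((n - 1) / 2).toNat 1 (idx + 2 * (n / 2)) (by omega) (by omega)
                (by omega) (by omega)]
            have hj : (p - (idx + 2 * (n / 2))) / 2 = (p - idx) / 2 - n / 2 := by omega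
            rw [hj]
            have hk0 : 0 ≤ (p - idx) / 2 := Int.ediv_nonneg (by omega) (by norm_num)
            have hklt : (p - idx) / 2 < n - 1 := by omega
            have hpair : (p - idx) / 2 / (n - 1) = 0 := Int.ediv_eq_zero_of_lt hk0 (by omega)
            have hrem : (p - idx) / 2 % (n - 1) = (p - idx) / 2 := Int.emod_eq_of_lt hk0 (by omega)
            unfold Bopt
            rw [hpair, hrem, if_neg (by omega : ¬ ((p - idx) / 2 < n / 2))]
            rw [if_neg (by omega : ¬ (l + 2 * 0 + 1 > n - 2))]
            refine congrArg some (congrArg₂ Prod.mk (by ring) (by ring))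
          · -- recurse to the next layer pair
            rw [innerA_none p n ((n - 1) / 2).toNat 1 (idx + 2 * (n / 2)) (by omega) (by omega)
                (by omega)]
            have hidx'' : idx + 2 * (n / 2) + 2 * ((((n - 1) / 2).toNat : Int)) = idx + 2 * (n - 1) := by
              omega
            rw [hidx'']
            show outerA p n (l + 1 + 1) (idx + 2 * (n - 1)) = Bopt (p - idx) n l
            rw [show l + 1 + 1 = l + 2 by ring]
            rw [ih (l + 2) (idx + 2 * (n - 1)) (by omega) (by omega) (by omega) (by omega)]
            have hq : p - (idx + 2 * (n - 1)) = (p - idx) - 2 * (n - 1) := by ring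
            rw [hq, Bopt_shift _ _ _ hn]

-- ===== VERDICT (by name: the statement is the Claim_ definition above) =====
theorem get_mzi_modes_for_phase_spec : Claim_equal_get_mzi_modes_for_phase := by
  intro p n hdom hpre
  obtain ⟨hn, hp0, hplt⟩ := hpre
  unfold Spec_get_mzi_modes_for_phase
  unfold get_mzi_modes_for_phase
  rw [outer_spec p n hn (n - 1).toNat 0 0 le_rfl rfl hp0 (by omega)]
  simp only [get_mzi_modes_for_phase_alt]
  rw [show p - 0 = p by ring]
  have hfd1 : PySem.Int.floordiv p 2 = p / 2 := PySem.Int.floordiv_eq_ediv_of_pos (by norm_num)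
  have hfd2 : PySem.Int.floordiv n 2 = n / 2 := PySem.Int.floordiv_eq_ediv_of_pos (by norm_num)
  have hfd3 : PySem.Int.floordiv (p / 2) (n - 1) = p / 2 / (n - 1) := PySem.Int.floordiv_eq_ediv_of_pos (by omega)
  have hmd : PySem.Int.mod (p / 2) (n - 1) = p / 2 % (n - 1) := PySem.Int.mod_eq_emod_of_pos (by omega)
  simp only [hfd1, hfd2, hfd3, hmd]
  unfold Bopt
  by_cases hr : p / 2 % (n - 1) < n / 2
  · rw [if_pos hr]
    by_cases hl : 0 + 2 * (p / 2 / (n - 1)) > n - 2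
    · rw [if_pos hl]
      simp only [if_pos hr]
      rw [if_pos (by omega : 2 * (p / 2 / (n - 1)) > n - 2)]
    · rw [if_neg hl]
      simp only [if_pos hr]
      rw [if_neg (by omega : ¬ (2 * (p / 2 / (n - 1)) > n - 2))]
  · rw [if_neg hr]
    by_cases hl : 0 + 2 * (p / 2 / (n - 1)) + 1 > n - 2
    · rw [if_pos hl]
      simp only [if_neg hr]
      rw [if_pos (by omega : 2 * (p / 2 / (n - 1)) + 1 > n - 2)]
    · rw [if_neg hl]
      simp only [if_neg hr]
      rw [if_neg (by omega : ¬ (2 * (p / 2 / (n - 1)) + 1 > n - 2))]
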